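-- pv_equiv track=rewrite | github.com/paciente23256/Criptoanalise | cifras_vigenere/kasiski.py | make_cosets
-- ===== SOURCE A (Python) =====
-- def make_cosets(text, n):
--     """Makes cosets out of a ciphertext given a key length; should return an array of strings"""
--     coset = [None] * n
--     testList = list (text)
--
--     for k in range (0, n):
--         i = k
--         tempString = ""
--         while (i) < len (testList) - 1:
--             tempString += testList[i]
--             i += n
--         coset[k] = tempString
--
--     return coset
-- ===== SOURCE B (Python) =====
-- def make_cosets(text, n):
--     """Makes cosets out of a ciphertext given a key length; should return an array of strings"""
--     cosets = [''] * n
--     if n > 0: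
--         for i in range(len(text) - 1):
--             cosets[i % n] += text[i]
--     return cosets
-- ===== Notes on version B (the rewrite author's own statement) =====
-- stated objective: simpler
-- what changed: Replaces A's nested per-coset loops (outer over k, inner striding by n) with a single forward pass that appends each character text[i] to cosets[i % n], preserving A's drop of the final character.
import Mathlib
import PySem

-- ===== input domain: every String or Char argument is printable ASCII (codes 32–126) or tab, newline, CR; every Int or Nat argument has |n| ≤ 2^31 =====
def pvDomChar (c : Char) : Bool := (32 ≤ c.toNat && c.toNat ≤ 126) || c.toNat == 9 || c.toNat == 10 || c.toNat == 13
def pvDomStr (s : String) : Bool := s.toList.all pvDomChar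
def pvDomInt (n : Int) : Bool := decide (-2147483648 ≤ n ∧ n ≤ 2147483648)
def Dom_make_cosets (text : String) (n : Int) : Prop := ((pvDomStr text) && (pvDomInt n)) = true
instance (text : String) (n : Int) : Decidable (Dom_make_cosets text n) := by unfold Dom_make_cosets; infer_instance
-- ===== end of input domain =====

-- B replaces A's nested per-coset stride loops with one forward pass appending text[i]
-- to cosets[i % n] (objective: simpler); same return value, proved below.

-- ===== PORT A =====
-- A's inner while loop: while i < len(testList) - 1: tempString += testList[i]; i += n.
-- Fuel (= testList.length) only makes the recursion total; when the loop is reached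
-- from A's body n ≥ 1 holds, so the fuel is never exhausted before the loop exits.
def aLoop (testList : List Char) (n : Int) : Nat → Int → String → String
  | 0, _, acc => acc
  | fuel + 1, i, acc =>
    if i < (testList.length : Int) - 1 then
      aLoop testList n fuel (i + n) (acc.push ((PySem.List.pyGet? testList i).getD ' '))
    else acc

def make_cosets (text : String) (n : Int) : List String :=
  let testList := text.toList
  (PySem.List.pyRange 0 n 1).map (fun k => aLoop testList n testList.length k "")

-- ===== PORT B =====
def make_cosets_alt (text : String) (n : Int) : List String :=
  let cs := text.toList
  let cosets := List.replicate n.toNat ""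
  if 0 < n then
    (PySem.List.pyRange 0 ((cs.length : Int) - 1) 1).foldl
      (fun acc i =>
        let k := (PySem.Int.mod i n).toNat
        acc.set k ((acc.getD k "").push ((PySem.List.pyGet? cs i).getD ' '))) cosets
  else cosets

-- ===== PRECONDITION & SPEC =====
def Spec_make_cosets (text : String) (n : Int) (out : List String) : Prop := out = make_cosets_alt text n
instance (text : String) (n : Int) (out : List String) : Decidable (Spec_make_cosets text n out) := by unfold Spec_make_cosets; infer_instance

-- ===== CLAIM (what is proved, stated in full; the proofs are below) =====
def Claim_equal_make_cosets : Prop := ∀ (text : String) (n : Int), Dom_make_cosets text n → Spec_make_cosets text n (make_cosets text n)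

-- ===== LEMMAS AND PROOFS =====

-- characters of coset k: the text[j] with j < m and j % n' = k, in ascending j
def charsOf (cs : List Char) (n' m k : Nat) : List Char :=
  ((List.range m).filter (fun j => decide (j % n' = k))).map (fun j => cs.getD j ' ')

theorem push_mk (s : String) (c : Char) (l : List Char) :
    (s.push c) ++ String.ofList l = s ++ String.ofList (c :: l) := by
  apply String.toList_injective
  simp

-- for 0 ≤ k < n', "j ≡ k (mod n')" is "j lies on the progression k, k+n', …"
theorem mod_cond_iff (n' k j : Nat) (hk : k < n') :
    j % n' = k ↔ (k ≤ j ∧ (j - k) % n' = 0) := by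
  constructor
  · intro h
    refine ⟨h ▸ Nat.mod_le j n', ?_⟩
    have hj : j = n' * (j / n') + j % n' := (Nat.div_add_mod j n').symm
    have he : j - k = n' * (j / n') := by omega
    rw [he]; exact Nat.mul_mod_right _ _
  · rintro ⟨hkj, hmod⟩
    have hj : j - k = n' * ((j - k) / n') + (j - k) % n' := (Nat.div_add_mod _ n').symm
    have he : j = k + n' * ((j - k) / n') := by omega
    rw [he, Nat.add_mul_mod_self_left]
    exact Nat.mod_eq_of_lt hk

-- one step of the arithmetic-progression filter
theorem filter_prog_step (n' m i : Nat) (hn : 0 < n') :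
    (List.range m).filter (fun j => decide (i ≤ j ∧ (j - i) % n' = 0)) =
      if i < m then
        i :: (List.range m).filter (fun j => decide (i + n' ≤ j ∧ (j - (i + n')) % n' = 0))
      else [] := by
  split
  case isFalse h =>
    apply List.filter_eq_nil_iff.mpr
    intro j hj
    simp only [List.mem_range] at hj
    simp only [decide_eq_true_eq, not_and]
    omega
  case isTrue h =>
    have hsplit : List.range m = List.range' 0 i ++ List.range' i (m - i) := by
      have h2 := @List.range'_append 0 i (m - i) 1
      simp only [Nat.zero_add, Nat.one_mul] at h2
      rw [show i + (m - i) = m from by omega] at h2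
      rw [List.range_eq_range', ← h2]
    have hsplit2 : List.range m = List.range' 0 (i + 1) ++ List.range' (i + 1) (m - i - 1) := by
      have h2 := @List.range'_append 0 (i + 1) (m - i - 1) 1
      simp only [Nat.zero_add, Nat.one_mul] at h2
      rw [show i + 1 + (m - i - 1) = m from by omega] at h2
      rw [List.range_eq_range', ← h2]
    conv_lhs => rw [hsplit, List.filter_append]
    have h1 : (List.range' 0 i).filter (fun j => decide (i ≤ j ∧ (j - i) % n' = 0)) = [] := by
      apply List.filter_eq_nil_iff.mpr
      intro j hj
      simp only [List.mem_range'] at hj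
      simp only [decide_eq_true_eq, not_and]
      omega
    rw [h1, List.nil_append]
    clear hsplit
    have hmi : m - i = (m - i - 1) + 1 := by omega
    rw [hmi, List.range'_succ, List.filter_cons]
    simp only [Nat.le_refl, Nat.sub_self, Nat.zero_mod, and_self, decide_true, if_true]
    congr 1
    rw [List.filter_congr (l := List.range' (i + 1) (m - i - 1) 1)
        (q := fun j => decide (i + n' ≤ j ∧ (j - (i + n')) % n' = 0))]
    · -- extend the filtered segment back to range m
      conv_rhs => rw [hsplit2, List.filter_append]
      have h2 : (List.range' 0 (i + 1)).filter (fun j => decide (i + n' ≤ j ∧ (j - (i + n')) % n' = 0)) = [] := by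
        apply List.filter_eq_nil_iff.mpr
        intro j hj
        simp only [List.mem_range'] at hj
        simp only [decide_eq_true_eq, not_and]
        omega
      rw [h2, List.nil_append]
    · intro j hj
      simp only [List.mem_range'] at hj
      simp only [decide_eq_decide]
      constructor
      · rintro ⟨h1, h2⟩
        have hdvd : n' ∣ (j - i) := Nat.dvd_of_mod_eq_zero h2
        have hge : n' ≤ j - i := Nat.le_of_dvd (by omega) hdvd
        refine ⟨by omega, ?_⟩
        have he : j - (i + n') = (j - i) - n' := by omega
        rw [he]
        obtain ⟨q, hq⟩ := hdvd
        have hq1 : 1 ≤ q := by nlinarith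
        have hr : j - i - n' = n' * (q - 1) := by
          rw [hq]
          cases q with
          | zero => omega
          | succ q => simp [Nat.mul_succ]
        rw [hr]; exact Nat.mul_mod_right _ _
      · rintro ⟨h1, h2⟩
        refine ⟨by omega, ?_⟩
        have hdvd : n' ∣ (j - (i + n')) := Nat.dvd_of_mod_eq_zero h2
        obtain ⟨q, hq⟩ := hdvd
        have hr : j - i = n' * (q + 1) := by rw [Nat.mul_succ]; omega
        rw [hr]; exact Nat.mul_mod_right _ _

-- A's inner loop collects exactly the progression i, i+n', … below len-1
theorem aLoop_eq (cs : List Char) (n' : Nat) (hn : 0 < n') :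
    ∀ (fuel i : Nat) (acc : String), cs.length - 1 - i ≤ fuel →
      aLoop cs (n' : Int) fuel (i : Int) acc =
        acc ++ String.ofList (((List.range (cs.length - 1)).filter
          (fun j => decide (i ≤ j ∧ (j - i) % n' = 0))).map (fun j => cs.getD j ' ')) := by
  intro fuel
  induction fuel with
  | zero =>
    intro i acc hfuel
    rw [filter_prog_step _ _ _ hn, if_neg (by omega)]
    simp [aLoop]
  | succ fuel ih =>
    intro i acc hfuel
    simp only [aLoop]
    by_cases h : (i : Int) < (cs.length : Int) - 1
    · rw [if_pos h]
      have hi : i < cs.length - 1 := by omega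
      rw [filter_prog_step _ _ _ hn, if_pos hi]
      have hget : (PySem.List.pyGet? cs (i : Int)).getD ' ' = cs.getD i ' ' := by
        simp [PySem.List.pyGet?_natCast, List.getD]
      rw [hget, show (i : Int) + (n' : Int) = ((i + n' : Nat) : Int) from by push_cast; ring]
      rw [ih (i + n') _ (by omega)]
      rw [List.map_cons, ← push_mk]
    · rw [if_neg h, filter_prog_step _ _ _ hn, if_neg (by omega)]
      simp

theorem charsOf_succ (cs : List Char) (n' m k : Nat) :
    charsOf cs n' (m + 1) k =
      charsOf cs n' m k ++ (if m % n' = k then [cs.getD m ' '] else []) := by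
  unfold charsOf
  rw [List.range_succ, List.filter_append, List.map_append]
  congr 1
  by_cases h : m % n' = k <;> simp [h]

-- B's single pass: after m steps coset k holds exactly the text[j], j < m, j % n' = k
theorem b_fold (cs : List Char) (n' : Nat) (hn : 0 < n') :
    ∀ (m : Nat), m ≤ cs.length →
      ((List.range m).map (fun (j : Nat) => (j : Int))).foldl
        (fun acc i =>
          acc.set (PySem.Int.mod i (n' : Int)).toNat
            ((acc.getD (PySem.Int.mod i (n' : Int)).toNat "").push ((PySem.List.pyGet? cs i).getD ' ')))
        (List.replicate n' "") =
      (List.range n').map (fun k => String.ofList (charsOf cs n' m k)) := by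
  intro m
  induction m with
  | zero =>
    intro _
    simp [charsOf, List.map_const']
  | succ m ih =>
    intro hm
    rw [List.range_succ, List.map_append, List.foldl_append, ih (by omega)]
    simp only [List.map_cons, List.map_nil, List.foldl_cons, List.foldl_nil]
    simp only [PySem.Int.mod_natCast, Int.toNat_natCast]
    have hk0 : m % n' < n' := Nat.mod_lt _ hn
    rw [PySem.List.getD_map_range _ _ _ _ hk0]
    have hget : (PySem.List.pyGet? cs (m : Int)).getD ' ' = cs.getD m ' ' := by
      simp [PySem.List.pyGet?_natCast, List.getD]
    rw [hget]
    apply List.ext_getElem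
    · simp
    · intro j hj1 hj2
      simp only [List.length_set, List.length_map, List.length_range] at hj1
      rw [List.getElem_set]
      rw [List.getElem_map, List.getElem_map]
      simp only [List.getElem_range]
      rw [charsOf_succ]
      by_cases hjk : m % n' = j
      · subst hjk
        apply String.toList_injective
        simp
      · simp only [if_neg hjk]
        simp

-- ===== VERDICT (by name: the statement is the Claim_ definition above) =====
theorem make_cosets_spec : Claim_equal_make_cosets := by
  intro text n _
  unfold Spec_make_cosets make_cosets make_cosets_alt
  by_cases hn : 0 < n
  · rw [if_pos hn]
    obtain ⟨n', rfl⟩ : ∃ n' : Nat, n = (n' : Int) :=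
      ⟨n.toNat, (Int.toNat_of_nonneg (le_of_lt hn)).symm⟩
    have hn' : 0 < n' := by exact_mod_cast hn
    set cs := text.toList with hcs
    rw [PySem.List.pyRange_one 0 (n' : Int), PySem.List.pyRange_one 0 ((cs.length : Int) - 1)]
    simp only [Int.sub_zero, Int.toNat_natCast, Int.zero_add, List.map_map, Int.toNat_natCast]
    rw [show ((cs.length : Int) - 1).toNat = cs.length - 1 from by omega]
    rw [b_fold cs n' hn' (cs.length - 1) (Nat.sub_le _ _)]
    apply List.map_congr_left
    intro k hk
    simp only [List.mem_range] at hk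
    simp only [Function.comp]
    rw [aLoop_eq cs n' hn' cs.length k "" (by omega)]
    show "" ++ _ = _
    rw [String.empty_append]
    unfold charsOf
    congr 2
    apply List.filter_congr
    intro j hj
    simp only [decide_eq_decide]
    exact (mod_cond_iff n' k j hk).symm
  · rw [if_neg hn]
    rw [PySem.List.pyRange_one_eq_nil (by omega), show n.toNat = 0 from by omega]
    simp
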